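-- pv_equiv track=rewrite | github.com/nicksauro/vespera | packages/vespera_metrics/research_log.py | _split_yaml_blocks
-- ===== SOURCE A (Python) =====
-- def _split_yaml_blocks(text: str) -> list[str]:
--     """Walk the ledger and return raw text between every consecutive ``---``.
--
--     The ledger interleaves YAML frontmatter blocks with free-form
--     markdown bodies and section dividers; only the blocks delimited by
--     lines that are EXACTLY ``---`` are candidate frontmatter. Markdown
--     ``---`` rules (indented, with surrounding whitespace) are NOT
--     delimiters.
--
--     Per Mira ledger header §Schema item 1: "Walk the file, splitting on
--     top-level ``---`` fences." A frontmatter entry is a PAIR of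
--     consecutive fences with YAML between them; prose bodies sit
--     BETWEEN entry pairs (and section header dividers in the doc preamble
--     sit BETWEEN doc sections). Both are also pairs of consecutive
--     fences from the walker's perspective.
--
--     Earlier toggle-walker implementations alternated open/close on each
--     fence, which inverted capture against the production ledger format
--     (capturing prose narration between entry pairs and skipping the
--     actual frontmatter entries). Fix: emit every chunk between
--     consecutive fences as a candidate; downstream
--     ``read_research_log_cumulative`` filters non-mapping YAML cleanly
--     via ``_validate_entry`` (mapping check + required-key check). This
--     is robust to:
--
--     - Production ledger: doc preamble fences (Authority, Schema) are
--       paired, but their contents do NOT parse as a mapping with the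
--       required keys → silently skipped (already-existing tolerant path).
--     - Production ledger: prose bodies between entry pairs do NOT parse
--       as YAML mappings → silently skipped.
--     - Mock test fixture: clean alternating entry blocks → parsed as
--       before (the empty chunk between two adjacent entry-close /
--       entry-open fences is also skipped).
--     """
--     fence_indices: list[int] = []
--     lines = text.splitlines()
--     for i, raw_line in enumerate(lines):
--         if raw_line.strip() == "---":
--             fence_indices.append(i)
--     blocks: list[str] = []
--     # Every consecutive pair of fences brackets a candidate block. We
--     # do NOT toggle open/close — that is the bug we are replacing.
--     for left, right in zip(fence_indices[:-1], fence_indices[1:]):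
--         # Slice EXCLUDES the fence lines themselves.
--         body = "\n".join(lines[left + 1 : right])
--         blocks.append(body)
--     return blocks
-- ===== SOURCE B (Python) =====
-- def _split_yaml_blocks(text: str) -> list[str]:
--     """Single streaming pass: accumulate lines after a fence, flush at the next fence."""
--     blocks: list[str] = []
--     current: list[str] = []
--     seen_fence = False
--     for line in text.splitlines():
--         if line.strip() == "---":
--             if seen_fence:
--                 blocks.append("\n".join(current))
--             current = []
--             seen_fence = True
--         elif seen_fence:
--             current.append(line)
--     return blocks
-- ===== Notes on version B (the rewrite author's own statement) =====
-- stated objective: simpler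
-- what changed: Replaced the two-pass design (collect all fence indices, then join slices between consecutive index pairs) by one streaming pass that accumulates lines into a current buffer after a fence and flushes it at each subsequent fence.
import Mathlib
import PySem

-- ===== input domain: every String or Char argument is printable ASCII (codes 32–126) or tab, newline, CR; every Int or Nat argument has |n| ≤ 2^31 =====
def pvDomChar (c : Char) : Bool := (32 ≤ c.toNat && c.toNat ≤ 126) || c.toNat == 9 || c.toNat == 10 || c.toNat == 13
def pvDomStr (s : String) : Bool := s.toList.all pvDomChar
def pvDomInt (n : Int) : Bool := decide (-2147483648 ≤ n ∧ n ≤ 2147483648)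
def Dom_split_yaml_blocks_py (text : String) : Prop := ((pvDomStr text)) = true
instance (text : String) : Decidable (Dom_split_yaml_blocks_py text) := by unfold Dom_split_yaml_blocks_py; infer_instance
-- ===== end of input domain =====

-- B replaces A's two passes (collect fence indices, then join slices between
-- consecutive pairs) by one streaming accumulate-and-flush pass; same cost.

-- ===== PORT A =====
def split_yaml_blocks_py (text : String) : List String :=
  let lines := PySem.Str.splitlines text
  let fence_indices : List Int :=
    (PySem.List.enumerate lines).foldl
      (fun acc p => if PySem.Str.strip p.2 = "---" then acc ++ [p.1] else acc) []
  let blocks : List String :=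
    (List.zip (PySem.List.slice fence_indices none (some (-1)))
              (PySem.List.slice fence_indices (some 1) none)).foldl
      (fun acc pr =>
        acc ++ [PySem.Str.join "\n" (PySem.List.slice lines (some (pr.1 + 1)) (some pr.2))]) []
  blocks

-- ===== PORT B =====
def split_yaml_blocks_py_alt (text : String) : List String :=
  (((PySem.Str.splitlines text).foldl
      (fun (st : Bool × List String × List String) line =>
        if PySem.Str.strip line = "---" then
          (true, [], if st.1 then st.2.2 ++ [PySem.Str.join "\n" st.2.1] else st.2.2)
        else if st.1 then (st.1, st.2.1 ++ [line], st.2.2)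
        else st)
      (false, [], [])).2.2)

-- ===== PRECONDITION & SPEC =====
def Spec_split_yaml_blocks_py (text : String) (out : List String) : Prop := out = split_yaml_blocks_py_alt text
instance (text : String) (out : List String) : Decidable (Spec_split_yaml_blocks_py text out) := by unfold Spec_split_yaml_blocks_py; infer_instance

-- ===== CLAIM (what is proved, stated in full; the proofs are below) =====
def Claim_equal_split_yaml_blocks_py : Prop := ∀ (text : String), Dom_split_yaml_blocks_py text → Spec_split_yaml_blocks_py text (split_yaml_blocks_py text)

-- ===== LEMMAS AND PROOFS =====

-- fence indices of `ls`, numbered from `s` (A's first pass, made structural)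
def pvFIdx : List String → Int → List Int
  | [], _ => []
  | l :: ls, s => if PySem.Str.strip l = "---" then s :: pvFIdx ls (s + 1) else pvFIdx ls (s + 1)

-- A's second pass, over an arbitrary index list
def pvPJ (full : List String) (fis : List Int) : List String :=
  (List.zip fis.dropLast fis.tail).map
    (fun pr => PySem.Str.join "\n" (PySem.List.slice full (some (pr.1 + 1)) (some pr.2)))

-- emitted blocks of B's streaming pass, structurally
def pvEch (seen : Bool) (cur : List String) : List String → List String
  | [] => []
  | l :: ls =>
    if PySem.Str.strip l = "---" then
      (cond seen [PySem.Str.join "\n" cur] []) ++ pvEch true [] ls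
    else pvEch seen (cond seen (cur ++ [l]) cur) ls

lemma pvFoldA (ls : List String) (s : Int) (acc : List Int) :
    (PySem.List.enumerate ls s).foldl
      (fun acc p => if PySem.Str.strip p.2 = "---" then acc ++ [p.1] else acc) acc
      = acc ++ pvFIdx ls s := by
  induction ls generalizing s acc with
  | nil => simp [pvFIdx, PySem.List.enumerate]
  | cons l ls ih =>
    rw [PySem.List.enumerate_cons]
    simp only [List.foldl_cons, pvFIdx]
    split_ifs with h <;> simp [ih]

lemma pvFoldB (pairs : List (Int × Int)) (acc : List String) (lines : List String) :
    pairs.foldl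
      (fun acc pr =>
        acc ++ [PySem.Str.join "\n" (PySem.List.slice lines (some (pr.1 + 1)) (some pr.2))]) acc
      = acc ++ pairs.map
          (fun pr => PySem.Str.join "\n" (PySem.List.slice lines (some (pr.1 + 1)) (some pr.2))) := by
  exact PySem.List.foldl_append_singleton_eq_map _ _ _

lemma pvFIdx_shift (ls : List String) (s : Int) :
    pvFIdx ls (s + 1) = (pvFIdx ls s).map (· + 1) := by
  induction ls generalizing s with
  | nil => simp [pvFIdx]
  | cons l ls ih => simp [pvFIdx]; split_ifs <;> simp [ih]

lemma pvFIdx_one (ls : List String) : pvFIdx ls 1 = (pvFIdx ls 0).map (· + 1) := by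
  simpa using pvFIdx_shift ls 0

lemma pvFIdx_nonneg (ls : List String) (s : Int) (i : Int) (h : i ∈ pvFIdx ls s) : s ≤ i := by
  induction ls generalizing s with
  | nil => simp [pvFIdx] at h
  | cons l ls ih =>
    simp only [pvFIdx] at h
    split_ifs at h with hf
    · rcases List.mem_cons.1 h with rfl | h
      · exact le_refl _
      · have := ih (s + 1) h; omega
    · have := ih (s + 1) h; omega

lemma pvSlice_cons_shift {α : Type} (x : α) (xs : List α) (a b : Int) (ha : 0 ≤ a) (hb : 0 ≤ b) :
    PySem.List.slice (x :: xs) (some (a + 1)) (some (b + 1)) = PySem.List.slice xs (some a) (some b) := by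
  rw [PySem.List.slice_toNat _ (by omega) (by omega), PySem.List.slice_toNat _ ha hb]
  have h1 : (a + 1).toNat = a.toNat + 1 := by omega
  have h2 : (b + 1).toNat = b.toNat + 1 := by omega
  simp [h1, h2]

lemma pvPJ_shift (x : String) (t : List String) (fis : List Int)
    (hnn : ∀ i ∈ fis, 0 ≤ i) :
    pvPJ (x :: t) (fis.map (· + 1)) = pvPJ t fis := by
  unfold pvPJ
  rw [show (fis.map (· + 1)).dropLast = fis.dropLast.map (· + 1) from (List.map_dropLast).symm,
      show (fis.map (· + 1)).tail = fis.tail.map (· + 1) from (List.map_tail).symm, List.zip_map]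
  rw [List.map_map]
  apply List.map_congr_left
  intro pr hpr
  obtain ⟨i, j⟩ := pr
  rcases List.of_mem_zip hpr with ⟨h1, h2⟩
  have ha : 0 ≤ i := hnn _ (List.dropLast_subset _ h1)
  have hb : 0 ≤ j := hnn _ (List.tail_subset _ h2)
  simp only [Function.comp, Prod.map]
  rw [show i + 1 + 1 = (i + 1) + 1 by ring]
  rw [pvSlice_cons_shift x t (i + 1) j (by omega) hb]

lemma pvPJ_cons_fence (l : String) (t : List String) (hl : PySem.Str.strip l = "---") :
    pvPJ (l :: t) (pvFIdx (l :: t) 0) =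
      match pvFIdx t 0 with
      | [] => []
      | j0 :: _ => PySem.Str.join "\n" (t.take j0.toNat) :: pvPJ t (pvFIdx t 0) := by
  have hnn : ∀ i ∈ pvFIdx t 0, 0 ≤ i := fun i h => pvFIdx_nonneg t 0 i h
  cases hfis : pvFIdx t 0 with
  | nil =>
    have hcons : pvFIdx (l :: t) 0 = [0] := by
      simp [pvFIdx, hl, pvFIdx_one, hfis]
    simp [hcons, pvPJ]
  | cons j0 rest =>
    have hj0 : 0 ≤ j0 := hnn j0 (hfis ▸ List.mem_cons_self ..)
    have hcons : pvFIdx (l :: t) 0 = 0 :: (j0 + 1) :: rest.map (· + 1) := by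
      simp [pvFIdx, hl, pvFIdx_one, hfis]
    have h2 := pvPJ_shift l t (j0 :: rest) (by rw [← hfis]; exact hnn)
    rw [hcons]
    unfold pvPJ
    simp only [List.tail_cons,
      List.dropLast_cons_of_ne_nil (List.cons_ne_nil _ _), List.zip_cons_cons, List.map_cons]
    rw [show (0 : Int) + 1 = 0 + 1 from rfl,
        pvSlice_cons_shift l t 0 j0 le_rfl hj0,
        PySem.List.slice_toNat _ le_rfl hj0]
    simp only [Int.toNat_zero, Nat.sub_zero, List.drop_zero]
    unfold pvPJ at h2
    simp only [List.map_cons, List.tail_cons] at h2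
    rw [h2]


lemma pvPJ_cons_nonfence (l : String) (t : List String) (hl : ¬ PySem.Str.strip l = "---") :
    pvPJ (l :: t) (pvFIdx (l :: t) 0) = pvPJ t (pvFIdx t 0) := by
  have hnn : ∀ i ∈ pvFIdx t 0, 0 ≤ i := fun i h => pvFIdx_nonneg t 0 i h
  have hcons : pvFIdx (l :: t) 0 = (pvFIdx t 0).map (· + 1) := by
    simp [pvFIdx, hl, pvFIdx_one]
  rw [hcons]
  exact pvPJ_shift l t (pvFIdx t 0) hnn

lemma pvEch_true (t : List String) (cur : List String) :
    pvEch true cur t =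
      match pvFIdx t 0 with
      | [] => []
      | j0 :: _ => PySem.Str.join "\n" (cur ++ t.take j0.toNat) :: pvPJ t (pvFIdx t 0) := by
  induction t generalizing cur with
  | nil => simp [pvEch, pvFIdx]
  | cons l t ih =>
    by_cases hl : PySem.Str.strip l = "---"
    · have hstep : pvEch true cur (l :: t) = PySem.Str.join "\n" cur :: pvEch true [] t := by
        simp [pvEch, hl]
      have hrec := pvPJ_cons_fence l t hl
      cases hfis : pvFIdx t 0 with
      | nil =>
        have hcons : pvFIdx (l :: t) 0 = [0] := by simp [pvFIdx, hl, pvFIdx_one, hfis]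
        rw [hstep, ih [], hfis, hcons]
        simp [pvPJ]
      | cons j0 rest =>
        have hcons : pvFIdx (l :: t) 0 = 0 :: (j0 + 1) :: rest.map (· + 1) := by
          simp [pvFIdx, hl, pvFIdx_one, hfis]
        rw [hfis, hcons] at hrec
        rw [hstep, ih [], hfis, hcons]
        simp [hrec]
    · have hcons : pvFIdx (l :: t) 0 = (pvFIdx t 0).map (· + 1) := by
        simp [pvFIdx, hl, pvFIdx_one]
      have hstep : pvEch true cur (l :: t) = pvEch true (cur ++ [l]) t := by
        simp [pvEch, hl]
      have hnf : pvPJ (l :: t) (pvFIdx (l :: t) 0) = pvPJ t (pvFIdx t 0) :=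
        pvPJ_cons_nonfence l t hl
      rw [hstep, ih (cur ++ [l]), hcons]
      cases hfis : pvFIdx t 0 with
      | nil => simp
      | cons j0 rest =>
        have hj0 : 0 ≤ j0 := pvFIdx_nonneg t 0 j0 (hfis ▸ List.mem_cons_self ..)
        have hto : (j0 + 1).toNat = j0.toNat + 1 := by omega
        rw [hcons, hfis] at hnf
        simp only [List.map_cons] at hnf ⊢
        rw [hnf]
        simp [hto, List.take_succ_cons, List.append_assoc]

lemma pvEch_false (t : List String) :
    pvEch false [] t = pvPJ t (pvFIdx t 0) := by
  induction t with
  | nil => simp [pvEch, pvPJ, pvFIdx]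
  | cons l t ih =>
    by_cases hl : PySem.Str.strip l = "---"
    · have hstep : pvEch false [] (l :: t) = pvEch true [] t := by simp [pvEch, hl]
      rw [hstep, pvEch_true t [], pvPJ_cons_fence l t hl]
      cases pvFIdx t 0 <;> simp
    · have hstep : pvEch false [] (l :: t) = pvEch false [] t := by simp [pvEch, hl]
      rw [hstep, pvPJ_cons_nonfence l t hl]
      exact ih

lemma pvFoldAlt (ls : List String) (seen : Bool) (cur blocks : List String) :
    ((ls.foldl
      (fun (st : Bool × List String × List String) line =>
        if PySem.Str.strip line = "---" then
          (true, [], if st.1 then st.2.2 ++ [PySem.Str.join "\n" st.2.1] else st.2.2)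
        else if st.1 then (st.1, st.2.1 ++ [line], st.2.2)
        else st)
      (seen, cur, blocks)).2.2) = blocks ++ pvEch seen cur ls := by
  induction ls generalizing seen cur blocks with
  | nil => simp [pvEch]
  | cons l ls ih =>
    simp only [List.foldl_cons]
    by_cases hl : PySem.Str.strip l = "---" <;> cases seen <;>
      simp [pvEch, hl, ih]

-- ===== VERDICT (by name: the statement is the Claim_ definition above) =====
theorem split_yaml_blocks_py_spec : Claim_equal_split_yaml_blocks_py := by
  intro text _
  unfold Spec_split_yaml_blocks_py split_yaml_blocks_py split_yaml_blocks_py_alt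
  dsimp only
  set lines := PySem.Str.splitlines text with hlines
  rw [pvFoldAlt lines false [] []]
  rw [pvFoldA lines 0 []]
  simp only [List.nil_append]
  rw [PySem.List.slice_to_neg_one, PySem.List.slice_from_one]
  rw [pvFoldB]
  simp only [List.nil_append]
  rw [pvEch_false]
  rfl
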